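-- pv_equiv track=rewrite | github.com/GulliverRecktolat/Domino | dominoes.py | pacs_validation
-- ===== SOURCE A (Python) =====
-- def pacs_validation(computer_pack, player_pack):
--     status = None
--     domino_snake = None
--     for domino in computer_pack:
--         if domino[0] == domino[1] and (domino_snake is None or domino[0] > domino_snake[1]):
--             domino_snake = domino
--             status = "player"
--     for domino in player_pack:
--         if domino[0] == domino[1] and (domino_snake is None or domino[0] > domino_snake[1]):
--             domino_snake = domino
--             status = "computer"
--     if status is not None:
--         return status, [domino_snake]
--     else:
--         return None
-- ===== SOURCE B (Python) =====
-- def pacs_validation(computer_pack, player_pack):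
--     def best_double(pack):
--         doubles = [d for d in pack if d[0] == d[1]]
--         return max(doubles, key=lambda d: d[0]) if doubles else None
--     c_best = best_double(computer_pack)
--     p_best = best_double(player_pack)
--     if c_best is None and p_best is None:
--         return None
--     if c_best is None:
--         return "computer", [p_best]
--     if p_best is None:
--         return "player", [c_best]
--     return ("computer", [p_best]) if p_best[0] > c_best[0] else ("player", [c_best])
-- ===== Notes on version B (the rewrite author's own statement) =====
-- stated objective: simpler
-- what changed: B selects each pack's best double independently with filter + max (first-of-ties) and then combines the two candidates with one comparison, instead of A's single mutable status/snake state threaded through two sequential scan loops.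
import Mathlib
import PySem

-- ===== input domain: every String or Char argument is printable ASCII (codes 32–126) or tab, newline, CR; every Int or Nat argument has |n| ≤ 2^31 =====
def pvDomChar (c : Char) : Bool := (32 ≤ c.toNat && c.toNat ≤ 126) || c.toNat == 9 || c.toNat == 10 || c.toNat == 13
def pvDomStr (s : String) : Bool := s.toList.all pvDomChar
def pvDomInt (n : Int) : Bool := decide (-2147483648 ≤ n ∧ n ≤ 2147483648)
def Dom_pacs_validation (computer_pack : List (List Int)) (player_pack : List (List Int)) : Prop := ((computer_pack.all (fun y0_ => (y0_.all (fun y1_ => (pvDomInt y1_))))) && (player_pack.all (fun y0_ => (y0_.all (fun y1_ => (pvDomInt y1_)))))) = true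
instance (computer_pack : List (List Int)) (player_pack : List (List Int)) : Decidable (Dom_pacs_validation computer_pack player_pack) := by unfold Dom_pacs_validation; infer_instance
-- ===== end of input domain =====

-- B replaces A's two sequential scans over a shared mutable status/snake state by two independent
-- per-pack best-double selections (filter + max, first of ties) combined with one comparison;
-- same cost, simpler decomposition. Equal on every input where the Python A returns (Pre_ below).

-- ===== PORT A =====
-- domino[i] for i = 0,1: exact on Pre_ (every domino has length ≥ 2); where Python raises
-- IndexError the fallback value 0 is never relied on (those inputs are outside Pre_).
def pvGet (d : List Int) (i : Int) : Int := (PySem.List.pyGet? d i).getD 0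

-- loop body shared by A's two for-loops (owner is the status string that loop assigns)
def pacsStep (owner : String) (st : Option String × Option (List Int)) (domino : List Int) :
    Option String × Option (List Int) :=
  if (pvGet domino 0 == pvGet domino 1)
      && (match st.2 with
          | none => true
          | some snake => decide (pvGet domino 0 > pvGet snake 1)) then
    (some owner, some domino)
  else st

def pacs_validation (computer_pack : List (List Int)) (player_pack : List (List Int)) : Option (String × List (List Int)) :=
  let st1 := computer_pack.foldl (pacsStep "player") (none, none)
  let st2 := player_pack.foldl (pacsStep "computer") st1
  match st2 with
  | (some status, snake) => some (status, [snake.getD []])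
  | (none, _) => none

-- ===== PORT B =====
-- best_double: filter to doubles, then Python max with key d[0] (first extremal), None if empty
def bestDouble (pack : List (List Int)) : Option (List Int) :=
  PySem.List.max? (pack.filter (fun d => pvGet d 0 == pvGet d 1)) (fun d => pvGet d 0)

def pacs_validation_alt (computer_pack : List (List Int)) (player_pack : List (List Int)) : Option (String × List (List Int)) :=
  match bestDouble computer_pack, bestDouble player_pack with
  | none, none => none
  | none, some pb => some ("computer", [pb])
  | some cb, none => some ("player", [cb])
  | some cb, some pb =>
      if pvGet pb 0 > pvGet cb 0 then some ("computer", [pb]) else some ("player", [cb])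

-- ===== PRECONDITION & SPEC =====
-- Pre_ excludes exactly the inputs on which the Python A raises IndexError: a domino of
-- length < 2 is always indexed (domino[0], and domino[1] when d[0]==d[1] reaches it).
def Pre_pacs_validation (computer_pack : List (List Int)) (player_pack : List (List Int)) : Prop :=
  (∀ d ∈ computer_pack, 2 ≤ d.length) ∧ (∀ d ∈ player_pack, 2 ≤ d.length)
instance (computer_pack : List (List Int)) (player_pack : List (List Int)) : Decidable (Pre_pacs_validation computer_pack player_pack) := by unfold Pre_pacs_validation; infer_instance

def pvWitness_pacs_validation : List (List Int) × List (List Int) := ([[1, 1], [2, 5]], [[2, 2]])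

def Spec_pacs_validation (computer_pack : List (List Int)) (player_pack : List (List Int)) (out : Option (String × List (List Int))) : Prop := out = pacs_validation_alt computer_pack player_pack
instance (computer_pack : List (List Int)) (player_pack : List (List Int)) (out : Option (String × List (List Int))) : Decidable (Spec_pacs_validation computer_pack player_pack out) := by unfold Spec_pacs_validation; infer_instance

-- ===== CLAIM (what is proved, stated in full; the proofs are below) =====
def Claim_equal_pacs_validation : Prop := ∀ (computer_pack : List (List Int)) (player_pack : List (List Int)), Dom_pacs_validation computer_pack player_pack → Pre_pacs_validation computer_pack player_pack → Spec_pacs_validation computer_pack player_pack (pacs_validation computer_pack player_pack)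

-- ===== LEMMAS AND PROOFS =====

-- proof-side running-max step (Python max with key d[0], first extremal)
def maxStep (acc : Option (List Int)) (x : List Int) : Option (List Int) :=
  match acc with
  | none => some x
  | some m => if pvGet m 0 < pvGet x 0 then some x else some m

def bestD (pack : List (List Int)) : Option (List Int) :=
  (pack.filter (fun d => pvGet d 0 == pvGet d 1)).foldl maxStep none

theorem bestDouble_eq_bestD (pack : List (List Int)) : bestDouble pack = bestD pack := by
  unfold bestDouble bestD
  cases h : pack.filter (fun d => pvGet d 0 == pvGet d 1) with
  | nil => simp [PySem.List.max?]
  | cons x t =>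
      show PySem.List.max? (x :: t) _ = _
      simp only [PySem.List.max?]
      refine List.foldl_ext _ _ _ ?_
      intro acc y _
      cases acc <;> rfl

theorem foldl_maxStep_prop (P : List Int → Prop) :
    ∀ (l : List (List Int)) (acc : Option (List Int)),
      (∀ x, acc = some x → P x) → (∀ x ∈ l, P x) →
      ∀ m, l.foldl maxStep acc = some m → P m := by
  intro l
  induction l with
  | nil => intro acc hacc _ m hm; exact hacc m hm
  | cons d t ih =>
      intro acc hacc hl m hm
      simp only [List.foldl_cons] at hm
      refine ih (maxStep acc d) ?_ (fun x hx => hl x (List.mem_cons_of_mem _ hx)) m hm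
      intro x hx
      unfold maxStep at hx
      cases acc with
      | none => cases hx; exact hl d (List.mem_cons_self ..)
      | some k =>
          by_cases h : pvGet k 0 < pvGet d 0 <;> simp [h] at hx <;> subst hx
          · exact hl d (List.mem_cons_self ..)
          · exact hacc k rfl

theorem bestD_double (pack : List (List Int)) (m : List Int) (h : bestD pack = some m) :
    pvGet m 0 = pvGet m 1 := by
  refine foldl_maxStep_prop (fun x => pvGet x 0 = pvGet x 1) _ none (by intro x hx; cases hx) ?_ m h
  intro x hx
  have := List.of_mem_filter hx
  simpa using this

-- threshold running max from a seed k equals the seedless max compared with k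
theorem foldl_maxStep_some (l : List (List Int)) :
    ∀ k : List Int,
      l.foldl maxStep (some k) =
        match l.foldl maxStep none with
        | none => some k
        | some m => if pvGet k 0 < pvGet m 0 then some m else some k := by
  induction l with
  | nil => intro k; simp
  | cons d t ih =>
      intro k
      simp only [List.foldl_cons]
      have hk : maxStep (some k) d = if pvGet k 0 < pvGet d 0 then some d else some k := rfl
      have hn : maxStep none d = some d := rfl
      rw [hk, hn]
      by_cases h : pvGet k 0 < pvGet d 0
      · rw [if_pos h, ih d]
        cases hm : t.foldl maxStep none with
        | none => simp [h]
        | some m =>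
            by_cases h2 : pvGet d 0 < pvGet m 0
            · simp only [h2, if_pos]
              have : pvGet k 0 < pvGet m 0 := lt_trans h h2
              simp [this]
            · simp [h2, h]
      · rw [if_neg h, ih k, ih d]
        cases hm : t.foldl maxStep none with
        | none => simp [h]
        | some m =>
            by_cases h2 : pvGet d 0 < pvGet m 0
            · simp [h2]
            · have hmk : ¬ pvGet k 0 < pvGet m 0 := by omega
              simp [h2, hmk, h]

-- A's loop over one pack starting with snake = some k (k a double)
theorem loop_some (o : String) :
    ∀ (pack : List (List Int)) (s : Option String) (k : List Int), pvGet k 0 = pvGet k 1 →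
      pack.foldl (pacsStep o) (s, some k) =
        match bestD pack with
        | none => (s, some k)
        | some m => if pvGet k 1 < pvGet m 0 then (some o, some m) else (s, some k) := by
  intro pack
  induction pack with
  | nil => intro s k hk; simp [bestD]
  | cons d t ih =>
      intro s k hk
      simp only [List.foldl_cons]
      have hstep : pacsStep o (s, some k) d =
          if (pvGet d 0 == pvGet d 1) && decide (pvGet d 0 > pvGet k 1) then (some o, some d)
          else (s, some k) := rfl
      by_cases hd : pvGet d 0 = pvGet d 1
      · have hbd : bestD (d :: t) =
            match bestD t with
            | none => some d
            | some m => if pvGet d 0 < pvGet m 0 then some m else some d := by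
          unfold bestD
          rw [List.filter_cons_of_pos (by simpa using hd)]
          simp only [List.foldl_cons]
          show (List.filter _ t).foldl maxStep (some d) = _
          exact foldl_maxStep_some _ d
        by_cases hb : pvGet k 1 < pvGet d 0
        · rw [hstep]
          rw [if_pos (by simp only [Bool.and_eq_true, beq_iff_eq, decide_eq_true_iff, gt_iff_lt]; exact ⟨hd, hb⟩)]
          rw [ih (some o) d hd, hbd]
          cases hm : bestD t with
          | none => simp [hb]
          | some m =>
              by_cases h2 : pvGet d 0 < pvGet m 0
              · have h2' : pvGet d 1 < pvGet m 0 := by omega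
                have h3 : pvGet k 1 < pvGet m 0 := by omega
                simp [h2, h2', h3]
              · have h2' : ¬ pvGet d 1 < pvGet m 0 := by omega
                simp [h2, h2', hb]
        · rw [hstep]
          rw [if_neg (by simp only [Bool.and_eq_true, beq_iff_eq, decide_eq_true_iff, gt_iff_lt]; tauto)]
          rw [ih s k hk, hbd]
          cases hm : bestD t with
          | none => simp [hb]
          | some m =>
              by_cases h2 : pvGet d 0 < pvGet m 0
              · simp [h2]
              · have hmk : ¬ pvGet k 1 < pvGet m 0 := by omega
                have hdk : ¬ pvGet k 1 < pvGet d 0 := hb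
                simp [h2, hmk, hdk]
      · have hbd : bestD (d :: t) = bestD t := by
          unfold bestD
          rw [List.filter_cons_of_neg (by simpa using hd)]
        rw [hstep, if_neg (by simp [hd]), ih s k hk, hbd]

-- A's loop over one pack starting with snake = None
theorem loop_none (o : String) :
    ∀ (pack : List (List Int)) (s : Option String),
      pack.foldl (pacsStep o) (s, none) =
        match bestD pack with
        | none => (s, none)
        | some m => (some o, some m) := by
  intro pack
  induction pack with
  | nil => intro s; simp [bestD]
  | cons d t ih =>
      intro s
      simp only [List.foldl_cons]
      have hstep : pacsStep o (s, none) d =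
          if (pvGet d 0 == pvGet d 1) && true then (some o, some d) else (s, none) := rfl
      by_cases hd : pvGet d 0 = pvGet d 1
      · have hbd : bestD (d :: t) =
            match bestD t with
            | none => some d
            | some m => if pvGet d 0 < pvGet m 0 then some m else some d := by
          unfold bestD
          rw [List.filter_cons_of_pos (by simpa using hd)]
          simp only [List.foldl_cons]
          show (List.filter _ t).foldl maxStep (some d) = _
          exact foldl_maxStep_some _ d
        rw [hstep, if_pos (by simp [hd]), loop_some o t (some o) d hd, hbd]
        cases hm : bestD t with
        | none => simp
        | some m =>
            by_cases h2 : pvGet d 0 < pvGet m 0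
            · have h2' : pvGet d 1 < pvGet m 0 := by omega
              simp [h2, h2']
            · have h2' : ¬ pvGet d 1 < pvGet m 0 := by omega
              simp [h2, h2']
      · have hbd : bestD (d :: t) = bestD t := by
          unfold bestD
          rw [List.filter_cons_of_neg (by simpa using hd)]
        rw [hstep, if_neg (by simp [hd]), ih s, hbd]

-- ===== VERDICT (by name: the statement is the Claim_ definition above) =====
theorem pacs_validation_spec : Claim_equal_pacs_validation := by
  intro computer_pack player_pack _ _
  unfold Spec_pacs_validation pacs_validation pacs_validation_alt
  rw [bestDouble_eq_bestD, bestDouble_eq_bestD]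
  rw [loop_none "player" computer_pack none]
  dsimp only
  cases hc : bestD computer_pack with
  | none =>
      dsimp only
      rw [loop_none "computer" player_pack none]
      cases hp : bestD player_pack with
      | none => rfl
      | some pb => rfl
  | some cb =>
      have hcb := bestD_double computer_pack cb hc
      dsimp only
      rw [loop_some "computer" player_pack (some "player") cb hcb]
      cases hp : bestD player_pack with
      | none => rfl
      | some pb =>
          by_cases h : pvGet cb 1 < pvGet pb 0
          · have h' : pvGet pb 0 > pvGet cb 0 := by omega
            simp [h, h']
          · have h' : ¬ pvGet pb 0 > pvGet cb 0 := by omega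
            simp [h, h']
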